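-- pv_equiv track=rewrite | github.com/Yedil-Nauryzbek/Aidy | WpfApp1/PythonCore/aidy/follow_mode.py | extract_after_wake
-- ===== SOURCE A (Python) =====
-- def extract_after_wake(text: str, wake_keywords: set[str]) -> str | None:
--     t = " ".join((text or "").strip().lower().split())
--     if not t:
--         return None
--     ordered = sorted({w.strip().lower() for w in wake_keywords if w and w.strip()}, key=len, reverse=True)
--     for w in ordered:
--         if t == w:
--             return ""
--         prefix = f"{w} "
--         if t.startswith(prefix):
--             return t[len(prefix):].strip()
--     return None
-- ===== SOURCE B (Python) =====
-- def extract_after_wake(text: str, wake_keywords: set[str]) -> str | None: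
--     words = (text or "").strip().lower().split()
--     if not words:
--         return None
--     cleaned = {w.strip().lower() for w in wake_keywords if w and w.strip()}
--     for i in range(len(words), 0, -1):
--         if " ".join(words[:i]) in cleaned:
--             return "" if i == len(words) else " ".join(words[i:])
--     return None
-- ===== Notes on version B (the rewrite author's own statement) =====
-- stated objective: alternative
-- what changed: B drops the sort entirely: instead of sorting the cleaned keywords by length descending and testing each as a string prefix of the normalized text, B enumerates the text's word-count prefixes from longest to shortest and looks each candidate up in the cleaned-keyword set.
import Mathlib
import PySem

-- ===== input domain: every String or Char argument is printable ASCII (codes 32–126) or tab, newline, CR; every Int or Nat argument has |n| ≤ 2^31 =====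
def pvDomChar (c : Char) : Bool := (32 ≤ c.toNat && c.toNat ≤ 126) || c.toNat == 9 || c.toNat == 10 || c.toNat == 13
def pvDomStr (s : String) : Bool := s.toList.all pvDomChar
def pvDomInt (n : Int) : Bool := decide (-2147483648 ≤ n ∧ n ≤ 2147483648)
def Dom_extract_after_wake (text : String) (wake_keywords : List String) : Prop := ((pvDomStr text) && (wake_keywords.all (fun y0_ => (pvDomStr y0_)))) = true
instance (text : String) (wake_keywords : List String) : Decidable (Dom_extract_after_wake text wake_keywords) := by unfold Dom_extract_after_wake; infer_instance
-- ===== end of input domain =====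

-- B replaces A's sort-keywords-by-length-then-prefix-test scan by a longest-first scan over the
-- text's own word-count prefixes with a set lookup (objective: alternative, same cost class).

-- ===== PORT A =====
-- the cleaned keyword set {w.strip().lower() for w in wake_keywords if w and w.strip()}
-- (this line is identical in A and in B, so both ports share it)
def awCleaned (wake_keywords : List String) : PySem.Set (List Char) :=
  PySem.Set.ofList
    ((wake_keywords.filter
        (fun w => !w.toList.isEmpty && !(PySem.Chars.strip w.toList).isEmpty)).map
      (fun w => PySem.Chars.lower (PySem.Chars.strip w.toList)))

-- A's 'for w in ordered' loop, step for step
def awLoopA (t : List Char) : List (List Char) → Option String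
  | [] => none
  | w :: rest =>
    if t = w then some ""
    else
      if PySem.Chars.startswith t (w ++ [' ']) then
        some (String.ofList (PySem.Chars.strip
          (PySem.Chars.slice t (some ((w ++ [' ']).length : Int)) none)))
      else awLoopA t rest

def extract_after_wake (text : String) (wake_keywords : List String) : Option String :=
  -- t = " ".join((text or "").strip().lower().split()); for a str, (text or "") = text
  let t := PySem.Chars.join [' ']
    (PySem.Chars.split₀ (PySem.Chars.lower (PySem.Chars.strip text.toList)))
  if t = [] then none
  else
    awLoopA t (PySem.List.sorted (awCleaned wake_keywords) (fun w => w.length) true)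

-- ===== PORT B =====
-- B's 'for i in range(len(words), 0, -1)' loop, counting i down
def awLoopB (S : PySem.Set (List Char)) (ws : List (List Char)) : Nat → Option String
  | 0 => none
  | (i+1) =>
    if PySem.Set.contains S (PySem.Chars.join [' '] (ws.take (i+1))) then
      if i + 1 = ws.length then some ""
      else some (String.ofList (PySem.Chars.join [' '] (ws.drop (i+1))))
    else awLoopB S ws i

def extract_after_wake_alt (text : String) (wake_keywords : List String) : Option String :=
  let ws := PySem.Chars.split₀ (PySem.Chars.lower (PySem.Chars.strip text.toList))
  if ws = [] then none
  else awLoopB (awCleaned wake_keywords) ws ws.length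

-- ===== PRECONDITION & SPEC =====
def Spec_extract_after_wake (text : String) (wake_keywords : List String) (out : Option String) : Prop := out = extract_after_wake_alt text wake_keywords
instance (text : String) (wake_keywords : List String) (out : Option String) : Decidable (Spec_extract_after_wake text wake_keywords out) := by unfold Spec_extract_after_wake; infer_instance

-- ===== CLAIM (what is proved, stated in full; the proofs are below) =====
def Claim_equal_extract_after_wake : Prop := ∀ (text : String) (wake_keywords : List String), Dom_extract_after_wake text wake_keywords → Spec_extract_after_wake text wake_keywords (extract_after_wake text wake_keywords)

-- ===== LEMMAS AND PROOFS =====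

-- a "word" is nonempty and whitespace-free
def awWord (u : List Char) : Prop := u ≠ [] ∧ ∀ c ∈ u, PySem.Chars.isspace c = false

theorem awWord_no_space {u : List Char} (h : awWord u) : ' ' ∉ u := by
  intro hc
  have := h.2 ' ' hc
  simp [PySem.Chars.isspace] at this

theorem split₀_go_words (s : List Char) : ∀ (cur : List Char) (acc : List (List Char)),
    (∀ c ∈ cur, PySem.Chars.isspace c = false) →
    (∀ u ∈ acc, awWord u) →
    ∀ u ∈ PySem.Chars.split₀.go s cur acc, awWord u := by
  induction s with
  | nil =>
    intro cur acc hcur hacc u hu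
    simp only [PySem.Chars.split₀.go] at hu
    split_ifs at hu with h1
    · exact hacc u (List.mem_reverse.1 hu)
    · rw [List.mem_reverse, List.mem_cons] at hu
      rcases hu with rfl | hu
      · refine ⟨by simpa [List.isEmpty_iff] using h1, fun c hc => hcur c (List.mem_reverse.1 hc)⟩
      · exact hacc u hu
  | cons c rest ih =>
    intro cur acc hcur hacc u hu
    simp only [PySem.Chars.split₀.go] at hu
    split_ifs at hu with h1 h2
    · exact ih [] acc (by simp) hacc u hu
    · refine ih [] (cur.reverse :: acc) (by simp) ?_ u hu
      intro u' hu'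
      rcases List.mem_cons.1 hu' with rfl | hu'
      · exact ⟨by simpa [List.isEmpty_iff] using h2, fun c' hc' => hcur c' (List.mem_reverse.1 hc')⟩
      · exact hacc u' hu'
    · refine ih (c :: cur) acc ?_ hacc u hu
      intro c' hc'
      rcases List.mem_cons.1 hc' with rfl | hc'
      · simpa using h1
      · exact hcur c' hc'

theorem split₀_words (s : List Char) : ∀ u ∈ PySem.Chars.split₀ s, awWord u := by
  intro u hu
  exact split₀_go_words s [] [] (by simp) (by simp) u hu

theorem join_cons_of_ne (a : List Char) {l : List (List Char)} (h : l ≠ []) :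
    PySem.Chars.join [' '] (a :: l) = a ++ ' ' :: PySem.Chars.join [' '] l := by
  cases l with
  | nil => exact absurd rfl h
  | cons b r => rw [PySem.Chars.join_cons_cons]; simp

theorem join_ne_nil {ws : List (List Char)} (hne : ws ≠ []) (hw : ∀ u ∈ ws, awWord u) :
    PySem.Chars.join [' '] ws ≠ [] := by
  cases ws with
  | nil => exact absurd rfl hne
  | cons a l =>
    cases l with
    | nil =>
      rw [PySem.Chars.join_singleton]
      exact (hw a (by simp)).1
    | cons b r =>
      rw [join_cons_of_ne a (by simp)]
      simp

-- splitting the join of a word list at word boundary i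
theorem join_take_drop (ws : List (List Char)) (i : Nat) (h1 : 1 ≤ i) (h2 : i < ws.length) :
    PySem.Chars.join [' '] ws =
      PySem.Chars.join [' '] (ws.take i) ++ ' ' :: PySem.Chars.join [' '] (ws.drop i) := by
  induction ws generalizing i with
  | nil => simp at h2
  | cons a rest ih =>
    rcases i with _ | j
    · omega
    rcases j with _ | k
    · have hr : rest ≠ [] := by
        simp at h2
        intro h; subst h; simp at h2
      simp only [List.take_succ_cons, List.take_zero, List.drop_succ_cons, List.drop_zero,
        PySem.Chars.join_singleton]
      exact join_cons_of_ne a hr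
    · have hr : rest ≠ [] := by
        simp at h2
        intro h; subst h; simp at h2
      have hlen : k + 1 < rest.length := by simpa using h2
      have h' := ih (k + 1) (by omega) hlen
      have htk : rest.take (k + 1) ≠ [] := by
        cases rest with
        | nil => exact absurd rfl hr
        | cons b r => simp
      rw [join_cons_of_ne a hr, h', List.take_succ_cons, List.drop_succ_cons,
        join_cons_of_ne a htk]
      simp

-- char length of the i-word prefix is strictly monotone in i
theorem join_take_length_lt (ws : List (List Char)) {i j : Nat}
    (h1 : 1 ≤ i) (hij : i < j) (hj : j ≤ ws.length) :
    (PySem.Chars.join [' '] (ws.take i)).length < (PySem.Chars.join [' '] (ws.take j)).length := by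
  have hlt : i < (ws.take j).length := by
    rw [List.length_take]; omega
  have h := join_take_drop (ws.take j) i h1 hlt
  rw [List.take_take, min_eq_left (le_of_lt hij)] at h
  rw [h]
  simp

-- the crux: a prefix of the join ending at a space is exactly a join of the first i words
theorem prefix_join_iff (ws : List (List Char)) (hw : ∀ u ∈ ws, awWord u) (w : List Char) :
    (w ++ [' ']) <+: PySem.Chars.join [' '] ws ↔
      ∃ i, 1 ≤ i ∧ i < ws.length ∧ w = PySem.Chars.join [' '] (ws.take i) := by
  induction ws generalizing w with
  | nil =>
    constructor
    · intro h
      have := h.length_le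
      simp [PySem.Chars.join_nil] at this
    · rintro ⟨i, h1, h2, _⟩
      simp at h2
  | cons a rest ih =>
    cases rest with
    | nil =>
      constructor
      · intro h
        rw [PySem.Chars.join_singleton] at h
        exact absurd (h.mem (by simp)) (awWord_no_space (hw a (by simp)))
      · rintro ⟨i, h1, h2, _⟩
        simp at h2
        omega
    | cons b rest' =>
      have hJ : PySem.Chars.join [' '] (a :: b :: rest') =
          (a ++ [' ']) ++ PySem.Chars.join [' '] (b :: rest') := by
        rw [PySem.Chars.join_cons_cons]
      have hone : w = a →
          ∃ i, 1 ≤ i ∧ i < (a :: b :: rest').length ∧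
            w = PySem.Chars.join [' '] ((a :: b :: rest').take i) := by
        rintro rfl
        exact ⟨1, le_refl 1, by simp, by simp [PySem.Chars.join_singleton]⟩
      constructor
      · intro h
        rw [hJ] at h
        rcases List.prefix_or_prefix_of_prefix h
            (List.prefix_append (a ++ [' ']) _) with hc | hc
        · -- w ++ [' '] is a prefix of a ++ [' ']
          have hlen : w.length + 1 ≤ a.length + 1 := by simpa using hc.length_le
          rcases lt_or_eq_of_le hlen with hlt | heq
          · exfalso
            have hwa : w ++ [' '] <+: a :=
              List.prefix_of_prefix_length_le hc (List.prefix_append a [' ']) (by simp; omega)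
            exact awWord_no_space (hw a (by simp)) (hwa.mem (by simp))
          · have : w ++ [' '] = a ++ [' '] := hc.eq_of_length (by simpa using heq)
            exact hone (List.append_cancel_right this)
        · -- a ++ [' '] is a prefix of w ++ [' ']
          have hlen : a.length + 1 ≤ w.length + 1 := by simpa using hc.length_le
          rcases lt_or_eq_of_le hlen with hlt | heq
          · have haw : a ++ [' '] <+: w :=
              List.prefix_of_prefix_length_le hc (List.prefix_append w [' ']) (by simp; omega)
            obtain ⟨w', rfl⟩ := haw
            rw [List.append_assoc] at h
            have h' := (List.prefix_append_right_inj (a ++ [' '])).1 h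
            obtain ⟨i, hi1, hi2, hi3⟩ :=
              (ih (fun u hu => hw u (List.mem_cons_of_mem a hu)) w').1 h'
            have htk : (b :: rest').take i ≠ [] := by
              cases i with
              | zero => omega
              | succ k => simp
            refine ⟨i + 1, by omega, by simp at hi2 ⊢; omega, ?_⟩
            rw [List.take_succ_cons, join_cons_of_ne a htk, ← hi3]
            simp
          · have : a ++ [' '] = w ++ [' '] := hc.eq_of_length (by simpa using heq)
            exact hone (List.append_cancel_right this).symm
      · rintro ⟨i, hi1, hi2, rfl⟩
        rw [join_take_drop (a :: b :: rest') i hi1 hi2]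
        exact ⟨PySem.Chars.join [' '] ((a :: b :: rest').drop i), by simp⟩

-- the full match test of A, characterised by word-count prefixes
theorem match_iff (ws : List (List Char)) (hw : ∀ u ∈ ws, awWord u) (hne : ws ≠ [])
    (w : List Char) :
    (PySem.Chars.join [' '] ws = w ∨ (w ++ [' ']) <+: PySem.Chars.join [' '] ws) ↔
      ∃ i, 1 ≤ i ∧ i ≤ ws.length ∧ w = PySem.Chars.join [' '] (ws.take i) := by
  have hlen : 1 ≤ ws.length := by
    cases ws with
    | nil => exact absurd rfl hne
    | cons a l => simp
  constructor
  · rintro (h | h)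
    · exact ⟨ws.length, hlen, le_refl _, by rw [List.take_length]; exact h.symm⟩
    · obtain ⟨i, h1, h2, h3⟩ := (prefix_join_iff ws hw w).1 h
      exact ⟨i, h1, le_of_lt h2, h3⟩
  · rintro ⟨i, h1, h2, h3⟩
    rcases eq_or_lt_of_le h2 with rfl | hlt
    · left
      rw [h3, List.take_length]
    · right
      exact (prefix_join_iff ws hw w).2 ⟨i, h1, hlt, h3⟩

-- dropping the matched prefix plus its separating space leaves the join of the remaining words
theorem drop_join (ws : List (List Char)) (i : Nat) (h1 : 1 ≤ i) (h2 : i < ws.length) :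
    (PySem.Chars.join [' '] ws).drop ((PySem.Chars.join [' '] (ws.take i)).length + 1) =
      PySem.Chars.join [' '] (ws.drop i) := by
  rw [join_take_drop ws i h1 h2,
    show PySem.Chars.join [' '] (ws.take i) ++ ' ' :: PySem.Chars.join [' '] (ws.drop i) =
      (PySem.Chars.join [' '] (ws.take i) ++ [' ']) ++ PySem.Chars.join [' '] (ws.drop i) by simp]
  rw [List.drop_left' (by simp)]

theorem join_exists_last (ws : List (List Char)) (hne : ws ≠ []) (hw : ∀ u ∈ ws, awWord u) :
    ∃ y c, PySem.Chars.join [' '] ws = y ++ [c] ∧ PySem.Chars.isspace c = false := by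
  induction ws with
  | nil => exact absurd rfl hne
  | cons u l ih =>
    cases l with
    | nil =>
      have hu : u ≠ [] := (hw u (by simp)).1
      refine ⟨u.dropLast, u.getLast hu, ?_, (hw u (by simp)).2 _ (List.getLast_mem hu)⟩
      rw [PySem.Chars.join_singleton, List.dropLast_append_getLast hu]
    | cons b r =>
      obtain ⟨y, c, hyc, hc⟩ := ih (by simp) (fun v hv => hw v (List.mem_cons_of_mem u hv))
      refine ⟨u ++ ' ' :: y, c, ?_, hc⟩
      rw [join_cons_of_ne u (by simp), hyc]
      simp

-- strip is the identity on a join of words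
theorem strip_join (ws : List (List Char)) (hne : ws ≠ []) (hw : ∀ u ∈ ws, awWord u) :
    PySem.Chars.strip (PySem.Chars.join [' '] ws) = PySem.Chars.join [' '] ws := by
  obtain ⟨c, z, hcz, hc⟩ : ∃ c z, PySem.Chars.join [' '] ws = c :: z ∧
      PySem.Chars.isspace c = false := by
    cases ws with
    | nil => exact absurd rfl hne
    | cons u l =>
      obtain ⟨c, u', rfl⟩ : ∃ c u', u = c :: u' := by
        cases u with
        | nil => exact absurd rfl (hw _ (by simp)).1
        | cons c u' => exact ⟨c, u', rfl⟩
      have hc : PySem.Chars.isspace c = false :=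
        (hw (c :: u') (by simp)).2 c (List.mem_cons_self ..)
      cases l with
      | nil => exact ⟨c, u', by rw [PySem.Chars.join_singleton], hc⟩
      | cons b r => exact ⟨c, u' ++ ' ' :: PySem.Chars.join [' '] (b :: r),
          by rw [join_cons_of_ne _ (by simp)]; simp, hc⟩
  obtain ⟨y, d, hyd, hd⟩ := join_exists_last ws hne hw
  rw [PySem.Chars.strip]
  have hl : PySem.Chars.lstrip (PySem.Chars.join [' '] ws) = PySem.Chars.join [' '] ws := by
    rw [hcz, PySem.Chars.lstrip, List.dropWhile_cons_of_neg (by simp [hc])]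
  rw [hl, hyd, PySem.Chars.rstrip]
  simp [List.dropWhile_cons_of_neg, hd]

-- the cleaned keyword set never contains the empty string
theorem awCleaned_ne_nil (kws : List String) : ∀ v ∈ awCleaned kws, v ≠ [] := by
  intro v hv
  rw [awCleaned, PySem.Set.mem_ofList, List.mem_map] at hv
  obtain ⟨u, hu, rfl⟩ := hv
  obtain ⟨-, hfilt⟩ := List.mem_filter.1 hu
  simp only [Bool.and_eq_true, Bool.not_eq_true'] at hfilt
  intro h
  rw [PySem.Chars.lower, List.map_eq_nil_iff] at h
  rw [h] at hfilt
  simp at hfilt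

theorem awLoopA_eq_none (t : List Char) (l : List (List Char))
    (h : ∀ w ∈ l, ¬(t = w ∨ (w ++ [' ']) <+: t)) : awLoopA t l = none := by
  induction l with
  | nil => rfl
  | cons w rest ih =>
    have hm := h w (by simp)
    rw [not_or] at hm
    rw [awLoopA, if_neg hm.1, if_neg (by simp [PySem.Chars.startswith_iff, hm.2])]
    exact ih fun w' hw' => h w' (List.mem_cons_of_mem w hw')

theorem awLoopA_eq_some (t : List Char) (b : List Char) (l : List (List Char))
    (hpair : l.Pairwise (fun a b => b.length ≤ a.length))
    (hb : b ∈ l) (hmb : t = b ∨ (b ++ [' ']) <+: t)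
    (hmax : ∀ w ∈ l, (t = w ∨ (w ++ [' ']) <+: t) →
      w.length ≤ b.length ∧ (w.length = b.length → w = b)) :
    awLoopA t l =
      (if t = b then some ""
       else some (String.ofList (PySem.Chars.strip
         (PySem.Chars.slice t (some ((b ++ [' ']).length : Int)) none)))) := by
  induction l with
  | nil => simp at hb
  | cons w rest ih =>
    obtain ⟨hphead, hptail⟩ := List.pairwise_cons.1 hpair
    have heqb : (t = w ∨ (w ++ [' ']) <+: t) → w = b := by
      intro hmw
      have hm := hmax w (by simp) hmw
      rcases List.mem_cons.1 hb with rfl | hbr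
      · rfl
      · exact hm.2 (le_antisymm hm.1 (hphead b hbr))
    by_cases h1 : t = w
    · have hwb : w = b := heqb (Or.inl h1)
      subst hwb
      rw [awLoopA, if_pos h1, if_pos h1]
    · by_cases h2 : (w ++ [' ']) <+: t
      · have hwb : w = b := heqb (Or.inr h2)
        subst hwb
        rw [awLoopA, if_neg h1, if_pos (by simp [PySem.Chars.startswith_iff, h2]), if_neg h1]
      · have hbr : b ∈ rest := by
          rcases List.mem_cons.1 hb with rfl | hbr
          · rcases hmb with h | h
            · exact absurd h h1
            · exact absurd h h2
          · exact hbr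
        rw [awLoopA, if_neg h1, if_neg (by simp [PySem.Chars.startswith_iff, h2])]
        exact ih hptail hbr fun w' hw' => hmax w' (List.mem_cons_of_mem w hw')

theorem awLoopB_eq_none (S : PySem.Set (List Char)) (ws : List (List Char)) (i : Nat)
    (h : ∀ j, 1 ≤ j → j ≤ i → PySem.Chars.join [' '] (ws.take j) ∉ S) :
    awLoopB S ws i = none := by
  induction i with
  | zero => rfl
  | succ i ih =>
    rw [awLoopB, if_neg]
    · exact ih fun j hj1 hj2 => h j hj1 (by omega)
    · simp only [PySem.Set.contains_eq_decide, decide_eq_true_eq]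
      exact h (i + 1) (by omega) (le_refl _)

theorem awLoopB_eq_some (S : PySem.Set (List Char)) (ws : List (List Char)) (i j : Nat)
    (h1 : 1 ≤ j) (hji : j ≤ i)
    (hjS : PySem.Chars.join [' '] (ws.take j) ∈ S)
    (hmax : ∀ k, j < k → k ≤ i → PySem.Chars.join [' '] (ws.take k) ∉ S) :
    awLoopB S ws i =
      (if j = ws.length then some ""
       else some (String.ofList (PySem.Chars.join [' '] (ws.drop j)))) := by
  induction i with
  | zero => omega
  | succ i ih =>
    by_cases hji2 : j = i + 1
    · subst hji2
      rw [awLoopB, if_pos (by simp only [PySem.Set.contains_eq_decide, decide_eq_true_eq]; exact hjS)]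
    · rw [awLoopB, if_neg]
      · exact ih (by omega) fun k hk1 hk2 => hmax k hk1 (by omega)
      · simp only [PySem.Set.contains_eq_decide, decide_eq_true_eq]
        exact hmax (i + 1) (by omega) (le_refl _)

-- ===== VERDICT (by name: the statement is the Claim_ definition above) =====
set_option maxHeartbeats 1000000 in
theorem extract_after_wake_spec : Claim_equal_extract_after_wake := by
  intro text kws _
  unfold Spec_extract_after_wake extract_after_wake extract_after_wake_alt
  set ws := PySem.Chars.split₀ (PySem.Chars.lower (PySem.Chars.strip text.toList)) with hws
  have hw : ∀ u ∈ ws, awWord u := split₀_words _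
  by_cases hnil : ws = []
  · simp [hnil, PySem.Chars.join_nil]
  · have htne : PySem.Chars.join [' '] ws ≠ [] := join_ne_nil hnil hw
    rw [if_neg htne, if_neg hnil]
    set S := awCleaned kws with hS
    set t := PySem.Chars.join [' '] ws with ht
    set ordered := PySem.List.sorted S (fun w => w.length) true with hord
    have hmemord : ∀ w, w ∈ ordered ↔ w ∈ S := fun w => PySem.List.mem_sorted S _ true w
    have hpair : ordered.Pairwise (fun a b => b.length ≤ a.length) :=
      PySem.List.sorted_pairwise_rev S (fun w => w.length)
    by_cases hex : ∃ i, 1 ≤ i ∧ i ≤ ws.length ∧ PySem.Chars.join [' '] (ws.take i) ∈ S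
    · obtain ⟨i0, hi01, hi02, hi03⟩ := hex
      set m := Nat.findGreatest (fun k => PySem.Chars.join [' '] (ws.take k) ∈ S) ws.length with hm
      have hPm : PySem.Chars.join [' '] (ws.take m) ∈ S :=
        Nat.findGreatest_spec (P := fun k => PySem.Chars.join [' '] (ws.take k) ∈ S) hi02 hi03
      have hmle : m ≤ ws.length :=
        Nat.findGreatest_le (P := fun k => PySem.Chars.join [' '] (ws.take k) ∈ S) ws.length
      have hgt : ∀ k, m < k → k ≤ ws.length → PySem.Chars.join [' '] (ws.take k) ∉ S :=
        fun k h1 h2 =>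
          Nat.findGreatest_is_greatest (P := fun k => PySem.Chars.join [' '] (ws.take k) ∈ S) h1 h2
      have hm1 : 1 ≤ m := by
        by_contra hcon
        have hm0 : m = 0 := by omega
        rw [hm0, List.take_zero, PySem.Chars.join_nil] at hPm
        exact awCleaned_ne_nil kws [] hPm rfl
      have hmatchb : t = PySem.Chars.join [' '] (ws.take m) ∨
          (PySem.Chars.join [' '] (ws.take m) ++ [' ']) <+: t :=
        (match_iff ws hw hnil _).2 ⟨m, hm1, hmle, rfl⟩
      have hmax : ∀ w ∈ ordered, (t = w ∨ (w ++ [' ']) <+: t) →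
          w.length ≤ (PySem.Chars.join [' '] (ws.take m)).length ∧
            (w.length = (PySem.Chars.join [' '] (ws.take m)).length →
              w = PySem.Chars.join [' '] (ws.take m)) := by
        intro w hwo hmw
        have hwS : w ∈ S := (hmemord w).1 hwo
        obtain ⟨i, hi1, hi2, rfl⟩ := (match_iff ws hw hnil w).1 hmw
        have hile : i ≤ m := by
          by_contra hcon
          exact hgt i (by omega) hi2 hwS
        rcases eq_or_lt_of_le hile with rfl | hlt
        · exact ⟨le_refl _, fun _ => rfl⟩
        · have hl := join_take_length_lt ws hi1 hlt hmle
          exact ⟨le_of_lt hl, fun hh => absurd hh (ne_of_lt hl)⟩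
      rw [awLoopA_eq_some t _ ordered hpair ((hmemord _).2 hPm) hmatchb hmax,
        awLoopB_eq_some S ws ws.length m hm1 hmle hPm hgt]
      by_cases hmn : m = ws.length
      · have htb : t = PySem.Chars.join [' '] (ws.take m) := by
          rw [ht, hmn, List.take_length]
        rw [if_pos htb, if_pos hmn]
      · have hmlt : m < ws.length := lt_of_le_of_ne hmle hmn
        have hlenlt := join_take_length_lt ws hm1 hmlt (le_refl ws.length)
        rw [List.take_length] at hlenlt
        have htb : t ≠ PySem.Chars.join [' '] (ws.take m) := by
          intro hh
          rw [ht] at hh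
          rw [hh] at hlenlt
          omega
        rw [if_neg htb, if_neg hmn]
        have hslice : PySem.Chars.slice t
            (some (((PySem.Chars.join [' '] (ws.take m) ++ [' ']).length : Int)) ) none =
            t.drop ((PySem.Chars.join [' '] (ws.take m)).length + 1) := by
          rw [PySem.Chars.slice_eq_listSlice, PySem.List.slice_from t (Int.natCast_nonneg _)]
          simp
        rw [hslice, ht, drop_join ws m hm1 hmlt,
          strip_join (ws.drop m) (by simp [List.drop_eq_nil_iff]; omega)
            (fun u hu => hw u (List.mem_of_mem_drop hu))]
    · rw [awLoopA_eq_none, awLoopB_eq_none]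
      · intro j h1 h2 hmem
        exact hex ⟨j, h1, h2, hmem⟩
      · intro w hwo hmw
        have hwS : w ∈ S := (hmemord w).1 hwo
        obtain ⟨i, hi1, hi2, rfl⟩ := (match_iff ws hw hnil w).1 hmw
        exact hex ⟨i, hi1, hi2, hwS⟩
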